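-- pv_equiv track=rewrite | github.com/pranaysuyash/metaextract | server/extractor/modules/scientific_dicom_fits_ultimate_advanced_extension_lxxi.py | _is_trauma_imaging_file
-- ===== SOURCE A (Python) =====
-- def _is_trauma_imaging_file(file_path: str) -> bool:
--     trauma_indicators = [
--         'trauma', 'injury', 'fracture', 'bleeding', 'hemorrhage',
--         'atls', 'gcs', 'ais', 'iss', 'tbi', 'car crash', 'mvc',
--         'fall from height', 'penetrating trauma', 'blunt trauma',
--         'motorcycle', 'pedestrian', 'hit and run', 'trauma center',
--         'trauma bay', 'emergency surgery', 'damage control'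
--     ]
--     try:
--         file_lower = file_path.lower()
--         if file_lower.endswith('.dcm'):
--             for indicator in trauma_indicators:
--                 if indicator in file_lower:
--                     return True
--     except Exception:
--         pass
--     return False
-- ===== SOURCE B (Python) =====
-- TRAUMA_INDICATORS = [
--     'trauma', 'injury', 'fracture', 'bleeding', 'hemorrhage',
--     'atls', 'gcs', 'ais', 'iss', 'tbi', 'car crash', 'mvc',
--     'fall from height', 'penetrating trauma', 'blunt trauma',
--     'motorcycle', 'pedestrian', 'hit and run', 'trauma center',
--     'trauma bay', 'emergency surgery', 'damage control'
-- ]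
--
-- def _is_trauma_imaging_file(file_path: str) -> bool:
--     # Position-major single scan: walk the string once and at each position
--     # test whether some keyword starts there (instead of one full substring
--     # search per keyword).
--     try:
--         f = file_path.lower()
--     except Exception:
--         return False
--     if not f.endswith('.dcm'):
--         return False
--     return any(
--         any(f.startswith(k, i) for k in TRAUMA_INDICATORS)
--         for i in range(len(f))
--     )
-- ===== Notes on version B (the rewrite author's own statement) =====
-- stated objective: alternative
-- what changed: Replaces the keyword-major loop (one full substring search per keyword) with a position-major scan: a single pass over the string positions testing at each position whether any keyword starts there.
import Mathlib
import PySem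

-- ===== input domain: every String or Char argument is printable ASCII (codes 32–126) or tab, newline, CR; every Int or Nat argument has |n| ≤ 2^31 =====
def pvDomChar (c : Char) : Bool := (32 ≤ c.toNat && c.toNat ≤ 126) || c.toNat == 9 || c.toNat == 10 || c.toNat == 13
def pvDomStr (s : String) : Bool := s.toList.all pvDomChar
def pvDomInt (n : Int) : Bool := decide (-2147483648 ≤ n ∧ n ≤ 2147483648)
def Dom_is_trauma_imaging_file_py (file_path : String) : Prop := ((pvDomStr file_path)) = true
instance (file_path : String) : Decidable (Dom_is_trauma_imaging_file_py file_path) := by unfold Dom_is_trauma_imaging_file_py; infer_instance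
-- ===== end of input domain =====

-- B replaces the keyword-major loop with a position-major single scan; alternative decomposition, same cost.
-- ===== PORT A =====
def pvTraumaIndicators : List String :=
  ["trauma", "injury", "fracture", "bleeding", "hemorrhage",
   "atls", "gcs", "ais", "iss", "tbi", "car crash", "mvc",
   "fall from height", "penetrating trauma", "blunt trauma",
   "motorcycle", "pedestrian", "hit and run", "trauma center",
   "trauma bay", "emergency surgery", "damage control"]

-- try/except is vacuous here: file_path is a String, so .lower()/.endswith never raise.
def is_trauma_imaging_file_py (file_path : String) : Bool :=
  let file_lower := PySem.Chars.lower file_path.toList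
  if PySem.Chars.endswith file_lower ".dcm".toList then
    pvTraumaIndicators.any (fun indicator => PySem.Chars.isIn indicator.toList file_lower)
  else
    false

-- ===== PORT B =====
-- f.startswith(k, i) is ported as: k is a prefix of f with the first i chars dropped (exact for 0 <= i).
def is_trauma_imaging_file_py_alt (file_path : String) : Bool :=
  let f := PySem.Chars.lower file_path.toList
  if !(PySem.Chars.endswith f ".dcm".toList) then
    false
  else
    (List.range f.length).any (fun i =>
      pvTraumaIndicators.any (fun k => PySem.Chars.startswith (f.drop i) k.toList))

-- ===== PRECONDITION & SPEC =====
def Spec_is_trauma_imaging_file_py (file_path : String) (out : Bool) : Prop := out = is_trauma_imaging_file_py_alt file_path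
instance (file_path : String) (out : Bool) : Decidable (Spec_is_trauma_imaging_file_py file_path out) := by unfold Spec_is_trauma_imaging_file_py; infer_instance

-- ===== CLAIM (what is proved, stated in full; the proofs are below) =====
def Claim_equal_is_trauma_imaging_file_py : Prop := ∀ (file_path : String), Dom_is_trauma_imaging_file_py file_path → Spec_is_trauma_imaging_file_py file_path (is_trauma_imaging_file_py file_path)

-- ===== LEMMAS AND PROOFS =====
lemma pvTraumaIndicators_ne_nil : ∀ k ∈ pvTraumaIndicators, k.toList ≠ [] := by decide

-- position-major scan equals keyword-major substring search (keywords are all nonempty)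
lemma pv_scan_eq (f : List Char) :
    ((List.range f.length).any (fun i =>
      pvTraumaIndicators.any (fun k => PySem.Chars.startswith (f.drop i) k.toList)))
    = pvTraumaIndicators.any (fun k => PySem.Chars.isIn k.toList f) := by
  apply Bool.eq_iff_iff.mpr
  simp only [List.any_eq_true, List.mem_range, PySem.Chars.startswith_iff]
  constructor
  · rintro ⟨i, _, k, hk, hp⟩
    refine ⟨k, hk, ?_⟩
    exact (PySem.Chars.exists_prefix_drop_iff_isIn k.toList f).mp ⟨i, hp⟩
  · rintro ⟨k, hk, hin⟩
    obtain ⟨j, hp⟩ := (PySem.Chars.exists_prefix_drop_iff_isIn k.toList f).mpr hin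
    by_cases hj : j < f.length
    · exact ⟨j, hj, k, hk, hp⟩
    · exfalso
      have hnil : f.drop j = [] := List.drop_eq_nil_of_le (le_of_not_gt hj)
      rw [hnil] at hp
      exact pvTraumaIndicators_ne_nil k hk (List.prefix_nil.mp hp)

-- ===== VERDICT (by name: the statement is the Claim_ definition above) =====
theorem is_trauma_imaging_file_py_spec : Claim_equal_is_trauma_imaging_file_py := by
  intro file_path _
  unfold Spec_is_trauma_imaging_file_py is_trauma_imaging_file_py is_trauma_imaging_file_py_alt
  simp
  rw [← pv_scan_eq]
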